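-- pv_equiv track=rewrite | github.com/sh1rokovs/Bioinformatics_programs | new/task_3.py | compare_dna
-- ===== SOURCE A (Python) =====
-- def compare_dna(def_kmer, def_DNA, b):
--     for el in def_DNA:
--         kmer_string = False
--         ctr = 0
--         while len(def_kmer) == len(el[ctr:ctr + len(def_kmer)]):
--             s = el[ctr:ctr + len(def_kmer)]
--             ir = 0
--             for elem in range(min(len(def_kmer), len(s))):
--                 if def_kmer[elem] != s[elem]:
--                     ir += 1
--             if ir <= b:
--                 kmer_string = True
--             ctr += 1
--         if not kmer_string:
--             return False
--     return True
-- ===== SOURCE B (Python) =====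
-- def compare_dna(def_kmer, def_DNA, b):
--     # Shift-and-count algorithm: index the k-mer's positions by character once,
--     # then for each DNA string count, per alignment i, how many characters MATCH
--     # (every equal-character pair (kmer position p, string position j) votes for
--     # alignment i = j - p).  A window at i has <= b mismatches iff it collects at
--     # least need = k - b matching votes.  No window is ever sliced or rescanned.
--     k = len(def_kmer)
--     need = k - b
--     pos = {}
--     for p, c in enumerate(def_kmer):
--         pos[c] = pos.get(c, []) + [p]
--     for el in def_DNA:
--         n = len(el)
--         if n < k:
--             return False          # no window of length k exists
--         if need <= 0:
--             continue              # every window is trivially within b mismatches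
--         hits = [j - p for j in range(n) for p in pos.get(el[j], [])
--                 if 0 <= j - p <= n - k]
--         cnt = {}
--         for i in hits:
--             cnt[i] = cnt.get(i, 0) + 1
--         if not any(v >= need for v in cnt.values()):
--             return False
--     return True
-- ===== Notes on version B (the rewrite author's own statement) =====
-- stated objective: alternative
-- what changed: A slides a window over each string and recounts mismatches per window; B uses a shift-and-count algorithm: it builds a dict mapping each k-mer character to its positions once, has every equal-character pair (pattern position, text position) vote for its alignment j-p in a counter dict, and accepts a string iff some alignment collects at least k-b matching votes (= at most b mismatches); no window is sliced or rescanned. Pre_ excludes only the empty k-mer with a nonempty DNA list, where A's while loop never terminates.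
import Mathlib
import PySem

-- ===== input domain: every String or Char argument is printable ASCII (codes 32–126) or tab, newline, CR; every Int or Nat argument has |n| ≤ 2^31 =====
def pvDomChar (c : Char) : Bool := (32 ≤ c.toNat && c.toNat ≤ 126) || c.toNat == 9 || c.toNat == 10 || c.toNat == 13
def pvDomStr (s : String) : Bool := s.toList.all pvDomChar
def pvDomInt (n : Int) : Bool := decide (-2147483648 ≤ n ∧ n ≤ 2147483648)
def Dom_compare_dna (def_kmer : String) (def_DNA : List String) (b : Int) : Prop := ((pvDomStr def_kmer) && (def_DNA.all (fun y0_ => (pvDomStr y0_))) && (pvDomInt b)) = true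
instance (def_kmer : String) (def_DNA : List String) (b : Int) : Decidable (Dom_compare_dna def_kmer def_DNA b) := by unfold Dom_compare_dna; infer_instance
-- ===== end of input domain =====

-- B replaces A's window-by-window mismatch recount by a shift-and-count algorithm:
-- a dict indexes the k-mer's positions per character, every equal-character pair votes
-- for its alignment j - p, and a string passes iff some alignment gets ≥ k - b votes
-- (objective: alternative algorithm, same result).

-- ===== PORT A =====
-- inner 'for elem in range(min(len(def_kmer), len(s))): if def_kmer[elem] != s[elem]: ir += 1'
def aCount (kmer s : List Char) : Int :=
  (PySem.List.pyRange 0 ((min kmer.length s.length : Nat) : Int) 1).foldl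
    (fun ir elem =>
      if PySem.List.pyGetD kmer elem ' ' ≠ PySem.List.pyGetD s elem ' ' then ir + 1 else ir) 0

-- the 'while len(def_kmer) == len(el[ctr:ctr+len(def_kmer)])' loop; fuel only makes it
-- total (for empty kmer the Python loop never exits; those inputs are outside Pre_)
def aWhile (fuel : Nat) (kmer el : List Char) (b ctr : Int) (flag : Bool) : Bool :=
  match fuel with
  | 0 => flag
  | fuel + 1 =>
    let s := PySem.List.slice el (some ctr) (some (ctr + (kmer.length : Int)))
    if (kmer.length : Int) = (s.length : Int) then
      let flag' := if aCount kmer s ≤ b then true else flag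
      aWhile fuel kmer el b (ctr + 1) flag'
    else flag

-- the 'for el in def_DNA' loop with its early 'return False'
def aLoop (kmer : List Char) (dna : List (List Char)) (b : Int) : Bool :=
  match dna with
  | [] => true
  | el :: rest =>
    let flag := aWhile (el.length + 1) kmer el b 0 false
    if !flag then false else aLoop kmer rest b

def compare_dna (def_kmer : String) (def_DNA : List String) (b : Int) : Bool :=
  aLoop def_kmer.toList (def_DNA.map String.toList) b

-- ===== PORT B =====
-- 'for p, c in enumerate(def_kmer): pos[c] = pos.get(c, []) + [p]'
def bPos (kmer : List Char) : PySem.Dict Char (List Int) :=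
  (PySem.List.enumerate kmer 0).foldl
    (fun d pc => d.modify pc.2 [] (· ++ [pc.1])) PySem.Dict.empty

-- 'hits = [j - p for j in range(n) for p in pos.get(el[j], []) if 0 <= j - p <= n - k]'
def bHits (pos : PySem.Dict Char (List Int)) (el : List Char) (k : Int) : List Int :=
  (PySem.List.pyRange 0 (el.length : Int) 1).flatMap (fun j =>
    ((pos.getD (PySem.List.pyGetD el j ' ') []).filter
        (fun p => decide (0 ≤ j - p) && decide (j - p ≤ (el.length : Int) - k))).map
      (fun p => j - p))

-- 'cnt = {}; for i in hits: cnt[i] = cnt.get(i, 0) + 1'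
def bCnt (hits : List Int) : PySem.Dict Int Int :=
  hits.foldl (fun d i => d.insert i (d.getD i 0 + 1)) PySem.Dict.empty

-- one string of the 'for el in def_DNA' body: False / trivially fine / vote check
def bCheck (pos : PySem.Dict Char (List Int)) (k need : Int) (el : List Char) : Bool :=
  if (el.length : Int) < k then false
  else if need ≤ 0 then true
  else (bCnt (bHits pos el k)).values.any (fun v => decide (need ≤ v))

def bLoop (pos : PySem.Dict Char (List Int)) (k need : Int) : List String → Bool
  | [] => true
  | el :: rest => if !bCheck pos k need el.toList then false else bLoop pos k need rest

def compare_dna_alt (def_kmer : String) (def_DNA : List String) (b : Int) : Bool :=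
  bLoop (bPos def_kmer.toList) (def_kmer.toList.length : Int)
    ((def_kmer.toList.length : Int) - b) def_DNA

-- ===== PRECONDITION & SPEC =====
-- Pre_ excludes only the empty k-mer with a nonempty DNA list, on which A's while
-- condition (0 == 0) never becomes false and A loops forever (it returns nothing there).
def Pre_compare_dna (def_kmer : String) (def_DNA : List String) (b : Int) : Prop :=
  def_kmer.toList ≠ [] ∨ def_DNA = []
instance (def_kmer : String) (def_DNA : List String) (b : Int) : Decidable (Pre_compare_dna def_kmer def_DNA b) := by unfold Pre_compare_dna; infer_instance

def pvWitness_compare_dna : String × List String × Int := ("AC", ["ACGT", "TTAC"], 1)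

def Spec_compare_dna (def_kmer : String) (def_DNA : List String) (b : Int) (out : Bool) : Prop := out = compare_dna_alt def_kmer def_DNA b
instance (def_kmer : String) (def_DNA : List String) (b : Int) (out : Bool) : Decidable (Spec_compare_dna def_kmer def_DNA b out) := by unfold Spec_compare_dna; infer_instance

-- ===== CLAIM (what is proved, stated in full; the proofs are below) =====
def Claim_equal_compare_dna : Prop := ∀ (def_kmer : String) (def_DNA : List String) (b : Int), Dom_compare_dna def_kmer def_DNA b → Pre_compare_dna def_kmer def_DNA b → Spec_compare_dna def_kmer def_DNA b (compare_dna def_kmer def_DNA b)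

-- ===== LEMMAS AND PROOFS =====

-- number of mismatching positions of the zip of two lists
def mismN : List Char → List Char → Nat
  | x :: xs, y :: ys => (if x = y then 0 else 1) + mismN xs ys
  | _, _ => 0

-- number of matching k-mer positions for the window of el starting at a
def matchCnt (kmer el : List Char) (a : Nat) : Nat :=
  (List.range kmer.length).countP (fun p => kmer.getD p ' ' == el.getD (a + p) ' ')

theorem foldl_count (P : Int → Prop) [DecidablePred P] : ∀ (l : List Int) (init : Int),
    l.foldl (fun ir j => if P j then ir + 1 else ir) init = init + (l.countP (fun j => decide (P j)) : Int) := by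
  intro l
  induction l with
  | nil => simp
  | cons a l ih =>
    intro init
    simp only [List.foldl_cons, List.countP_cons, ih]
    by_cases h : P a <;> simp [h] <;> push_cast <;> ring

theorem countP_range_mism : ∀ (xs ys : List Char),
    (List.range (min xs.length ys.length)).countP
      (fun k => decide (xs[k]?.getD ' ' ≠ ys[k]?.getD ' ')) = mismN xs ys := by
  intro xs
  induction xs with
  | nil => intro ys; simp [mismN]
  | cons x xs ih =>
    intro ys
    cases ys with
    | nil => simp [mismN]
    | cons y ys =>
      rw [show min (x :: xs).length (y :: ys).length = min xs.length ys.length + 1 by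
        simp [Nat.succ_min_succ]]
      rw [List.range_succ_eq_map, List.countP_cons, List.countP_map]
      have hshift : List.countP
            ((fun k => decide ((x :: xs)[k]?.getD ' ' ≠ (y :: ys)[k]?.getD ' ')) ∘ Nat.succ)
            (List.range (min xs.length ys.length))
          = List.countP (fun k => decide (xs[k]?.getD ' ' ≠ ys[k]?.getD ' '))
            (List.range (min xs.length ys.length)) := by
        apply List.countP_congr
        intro k _
        simp
      rw [hshift, ih]
      by_cases hxy : x = y <;> (simp [mismN, hxy]; try omega)

theorem aCount_eq (xs ys : List Char) : aCount xs ys = (mismN xs ys : Int) := by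
  unfold aCount
  rw [foldl_count]
  rw [PySem.List.pyRange_one]
  simp only [List.countP_map, Int.sub_zero, Int.toNat_natCast, zero_add]
  rw [← countP_range_mism xs ys]
  congr 1
  apply List.countP_congr
  intro k _
  simp [PySem.List.pyGetD_natCast]

theorem mismN_le : ∀ (xs ys : List Char), mismN xs ys ≤ xs.length := by
  intro xs
  induction xs with
  | nil => intro ys; cases ys <;> simp [mismN]
  | cons x xs ih =>
    intro ys
    cases ys with
    | nil => simp [mismN]
    | cons y ys =>
      have := ih ys
      by_cases h : x = y <;> simp [mismN, h] <;> omega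

theorem aWhile_eq (kmer el : List Char) (b : Int) (hk : kmer ≠ []) :
    ∀ (fuel : Nat) (ctr : Int) (flag : Bool), 0 ≤ ctr →
      ((el.length : Int) - (kmer.length : Int) + 1 - ctr).toNat ≤ fuel →
      aWhile fuel kmer el b ctr flag =
        (flag || (PySem.List.pyRange ctr ((el.length : Int) - (kmer.length : Int) + 1) 1).any
          (fun i => decide (aCount kmer (PySem.List.slice el (some i) (some (i + (kmer.length : Int)))) ≤ b))) := by
  have hk1 : 1 ≤ kmer.length := List.length_pos_iff.mpr hk
  intro fuel
  induction fuel with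
  | zero =>
    intro ctr flag h0 hf
    have hle : (el.length : Int) - (kmer.length : Int) + 1 ≤ ctr := by omega
    rw [PySem.List.pyRange_one_eq_nil hle]
    simp [aWhile]
  | succ fuel ih =>
    intro ctr flag h0 hf
    have hslen : ((PySem.List.slice el (some ctr) (some (ctr + (kmer.length : Int)))).length : Int)
        = min (ctr + (kmer.length : Int)) (el.length : Int) - min ctr (el.length : Int) := by
      rw [PySem.List.length_slice]
      simp only [PySem.List.clampIdx]
      split_ifs <;> omega
    by_cases hin : ctr + (kmer.length : Int) ≤ (el.length : Int)
    · have hcond : ((kmer.length : Nat) : Int) = ((PySem.List.slice el (some ctr) (some (ctr + (kmer.length : Int)))).length : Int) := by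
        rw [hslen]; omega
      have hlt : ctr < (el.length : Int) - (kmer.length : Int) + 1 := by omega
      rw [aWhile, if_pos hcond, ih (ctr + 1) _ (by omega) (by omega)]
      rw [PySem.List.pyRange_one_cons hlt]
      simp only [List.any_cons]
      by_cases hp : aCount kmer (PySem.List.slice el (some ctr) (some (ctr + (kmer.length : Int)))) ≤ b
      · simp [hp]
      · simp [hp]
    · have hcond : ¬ (((kmer.length : Nat) : Int) = ((PySem.List.slice el (some ctr) (some (ctr + (kmer.length : Int)))).length : Int)) := by
        rw [hslen]; omega
      rw [aWhile, if_neg hcond]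
      have hle : (el.length : Int) - (kmer.length : Int) + 1 ≤ ctr := by omega
      rw [PySem.List.pyRange_one_eq_nil hle]
      simp

-- ---- B-side lemmas ----

-- enumerate as an indexed range (Char lists; default ' ' is never reached)
theorem enumerate_eq : ∀ (xs : List Char) (s : Int),
    PySem.List.enumerate xs s
      = (List.range xs.length).map (fun (t : Nat) => (s + (t : Int), xs.getD t ' ')) := by
  intro xs
  induction xs with
  | nil => intro s; simp [PySem.List.enumerate]
  | cons x xs ih =>
    intro s
    rw [PySem.List.enumerate_cons, ih]
    simp [List.range_succ_eq_map, List.map_map, Function.comp_def]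
    intro a _
    ring

-- the position dict: pos[c] is exactly the (increasing) list of positions of c in kmer
theorem bPos_getD (kmer : List Char) (c : Char) :
    (bPos kmer).getD c []
      = ((List.range kmer.length).filter (fun t => kmer.getD t ' ' == c)).map (fun (t : Nat) => (t : Int)) := by
  have h : (PySem.List.enumerate kmer 0).foldl
      (fun d pc => d.modify pc.2 [] (· ++ [pc.1])) (PySem.Dict.empty : PySem.Dict Char (List Int))
      = (((PySem.List.enumerate kmer 0).map (fun pc => (pc.2, pc.1))).foldl
          (fun d p => d.modify p.1 [] (· ++ [p.2])) PySem.Dict.empty) := by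
    rw [List.foldl_map]
  rw [bPos, h, PySem.Dict.getD_foldl_modify_append]
  rw [enumerate_eq]
  simp [List.map_map, Function.comp_def, List.filter_map]

theorem posL_count (kmer : List Char) (c : Char) (q : Int) :
    (((List.range kmer.length).filter (fun t => kmer.getD t ' ' == c)).map (fun (t:Nat) => (t : Int))).count q
      = if 0 ≤ q ∧ q < (kmer.length : Int) ∧ kmer.getD q.toNat ' ' = c then 1 else 0 := by
  have hnd : (((List.range kmer.length).filter (fun t => kmer.getD t ' ' == c)).map (fun (t:Nat) => (t:Int))).Nodup :=
    (List.Nodup.filter _ List.nodup_range).map (fun a b h => by exact_mod_cast h)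
  by_cases h : 0 ≤ q ∧ q < (kmer.length : Int) ∧ kmer.getD q.toNat ' ' = c
  · rw [if_pos h]
    refine List.count_eq_one_of_mem hnd ?_
    simp only [List.mem_map, List.mem_filter, List.mem_range]
    exact ⟨q.toNat, ⟨by omega, by simpa [List.getD_eq_getElem?_getD] using h.2.2⟩, by omega⟩
  · rw [if_neg h]
    apply List.count_eq_zero_of_not_mem
    simp only [List.mem_map, List.mem_filter, List.mem_range]
    rintro ⟨t, ⟨ht, hc⟩, rfl⟩
    apply h
    refine ⟨by omega, by omega, ?_⟩
    simpa [List.getD_eq_getElem?_getD] using hc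

theorem countP_range_shift (a m n : Nat) (h : a + m ≤ n) (R : Nat → Bool) :
    (List.range n).countP (fun t => decide (a ≤ t) && decide (t < a + m) && R (t - a))
      = (List.range m).countP R := by
  obtain ⟨r, rfl⟩ := Nat.exists_eq_add_of_le h
  rw [List.range_add, List.countP_append, List.range_add, List.countP_append, List.countP_map, List.countP_map]
  have h1 : (List.range a).countP (fun t => decide (a ≤ t) && decide (t < a + m) && R (t - a)) = 0 := by
    rw [List.countP_eq_zero]
    intro t ht
    simp only [List.mem_range] at ht
    simp [Nat.not_le.mpr ht]
  have h2 : (List.range m).countP ((fun t => decide (a ≤ t) && decide (t < a + m) && R (t - a)) ∘ (a + ·))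
      = (List.range m).countP R := by
    apply List.countP_congr
    intro p hp
    simp only [List.mem_range] at hp
    simp [hp]
  have h3 : (List.range r).countP ((fun t => decide (a ≤ t) && decide (t < a + m) && R (t - a)) ∘ ((a + m) + ·)) = 0 := by
    rw [List.countP_eq_zero]
    intro t _
    have hnn : ¬ (a + m + t < a + m) := by omega
    simp [Function.comp, hnn]
  rw [h1, h2, h3]
  omega

theorem inner_count (L : List Int) (j i : Int) :
    (L.map (fun p => j - p)).count i = L.count (j - i) := by
  have h2 := List.count_map_of_injective L (fun p => j - p) (fun a b hab => by dsimp at hab; omega) (j - i)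
  simpa using h2

-- the window at i as a drop/take
theorem window_eq (el : List Char) (i : Int) (k : Nat) (h0 : 0 ≤ i)
    (h1 : i + (k : Int) ≤ (el.length : Int)) :
    PySem.List.slice el (some i) (some (i + (k : Int))) = (el.drop i.toNat).take k := by
  rw [PySem.List.slice_toNat el h0 (by omega)]
  congr 1
  omega

-- mismatches + matches of a full window = k
theorem mism_match (kmer el : List Char) (i : Int) (h0 : 0 ≤ i)
    (h1 : i ≤ (el.length : Int) - (kmer.length : Int)) :
    (mismN kmer ((el.drop i.toNat).take kmer.length) : Int)
      = (kmer.length : Int) - (matchCnt kmer el i.toNat : Int) := by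
  set w := (el.drop i.toNat).take kmer.length with hw
  have hwl : w.length = kmer.length := by
    rw [hw, List.length_take, List.length_drop]
    omega
  have hmin : min kmer.length w.length = kmer.length := by omega
  rw [← countP_range_mism kmer w, hmin]
  have hcompl : (List.range kmer.length).countP (fun t => decide (kmer[t]?.getD ' ' ≠ w[t]?.getD ' '))
      + matchCnt kmer el i.toNat = kmer.length := by
    unfold matchCnt
    have hmc : (List.range kmer.length).countP (fun p => kmer.getD p ' ' == el.getD (i.toNat + p) ' ')
        = (List.range kmer.length).countP (fun t => !(decide (kmer[t]?.getD ' ' ≠ w[t]?.getD ' '))) := by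
      apply List.countP_congr
      intro t ht
      simp only [List.mem_range] at ht
      have hwt : w[t]? = el[i.toNat + t]? := by
        rw [hw, List.getElem?_take_of_lt ht, List.getElem?_drop]
      simp only [List.getD_eq_getElem?_getD, hwt, Bool.not_eq_true', decide_not]
      simp [beq_iff_eq]
    rw [hmc]
    have := List.length_eq_length_filter_add (fun t => decide (kmer[t]?.getD ' ' ≠ w[t]?.getD ' ')) (l := List.range kmer.length)
    rw [List.countP_eq_length_filter, List.countP_eq_length_filter]
    simp only [List.length_range] at this ⊢
    omega
  have hle : (List.range kmer.length).countP (fun t => decide (kmer[t]?.getD ' ' ≠ w[t]?.getD ' ')) ≤ kmer.length := by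
    have := List.countP_le_length (l := List.range kmer.length) (p := fun t => decide (kmer[t]?.getD ' ' ≠ w[t]?.getD ' '))
    simpa using this
  omega

-- every vote is for a valid alignment
theorem bHits_mem (kmer el : List Char) (i : Int)
    (h : i ∈ bHits (bPos kmer) el (kmer.length : Int)) :
    0 ≤ i ∧ i ≤ (el.length : Int) - (kmer.length : Int) := by
  unfold bHits at h
  rw [List.mem_flatMap] at h
  obtain ⟨j, _, hj⟩ := h
  simp only [List.mem_map, List.mem_filter] at hj
  obtain ⟨p, ⟨_, hg⟩, rfl⟩ := hj
  simp only [Bool.and_eq_true, decide_eq_true_eq] at hg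
  exact hg

-- the vote count of a valid alignment is its number of matching positions
theorem bHits_count (kmer el : List Char) (i : Int) (h0 : 0 ≤ i)
    (h1 : i ≤ (el.length : Int) - (kmer.length : Int)) :
    (bHits (bPos kmer) el (kmer.length : Int)).count i = matchCnt kmer el i.toNat := by
  unfold bHits
  rw [List.count_flatMap, PySem.List.pyRange_one, List.map_map]
  simp only [Int.sub_zero, Int.toNat_natCast, Function.comp_def, zero_add]
  have hstep : ∀ t : Nat,
      ((((bPos kmer).getD (PySem.List.pyGetD el (t : Int) ' ') []).filter
          (fun p => decide (0 ≤ (t : Int) - p) && decide ((t : Int) - p ≤ (el.length : Int) - (kmer.length : Int)))).map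
        (fun p => (t : Int) - p)).count i
      = if (decide (i.toNat ≤ t) && decide (t < i.toNat + kmer.length)
            && (kmer.getD (t - i.toNat) ' ' == el.getD (i.toNat + (t - i.toNat)) ' ')) then 1 else 0 := by
    intro t
    rw [inner_count]
    by_cases ha : i.toNat ≤ t
    · have hg : (decide (0 ≤ (t : Int) - ((t : Int) - i)) && decide ((t : Int) - ((t : Int) - i) ≤ (el.length : Int) - (kmer.length : Int))) = true := by
        simp only [Bool.and_eq_true, decide_eq_true_eq]
        constructor <;> omega
      rw [List.count_filter (p := fun p => decide (0 ≤ (t : Int) - p) && decide ((t : Int) - p ≤ (el.length : Int) - (kmer.length : Int))) hg, bPos_getD, posL_count]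
      rw [PySem.List.pyGetD_natCast]
      by_cases hcnd : 0 ≤ (t : Int) - i ∧ (t : Int) - i < (kmer.length : Int) ∧ kmer.getD ((t : Int) - i).toNat ' ' = el.getD t ' '
      · rw [if_pos hcnd]
        have e1 : ((t : Int) - i).toNat = t - i.toNat := by omega
        have e2 : i.toNat + (t - i.toNat) = t := by omega
        have : (decide (i.toNat ≤ t) && decide (t < i.toNat + kmer.length)
            && (kmer.getD (t - i.toNat) ' ' == el.getD (i.toNat + (t - i.toNat)) ' ')) = true := by
          simp only [Bool.and_eq_true, decide_eq_true_eq, beq_iff_eq]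
          refine ⟨⟨ha, by omega⟩, ?_⟩
          rw [e2, ← e1]
          exact hcnd.2.2
        rw [if_pos this]
      · rw [if_neg hcnd]
        have : ¬ ((decide (i.toNat ≤ t) && decide (t < i.toNat + kmer.length)
            && (kmer.getD (t - i.toNat) ' ' == el.getD (i.toNat + (t - i.toNat)) ' ')) = true) := by
          simp only [Bool.and_eq_true, decide_eq_true_eq, beq_iff_eq]
          rintro ⟨⟨-, hlt⟩, heq⟩
          apply hcnd
          have e1 : ((t : Int) - i).toNat = t - i.toNat := by omega
          have e2 : i.toNat + (t - i.toNat) = t := by omega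
          refine ⟨by omega, by omega, ?_⟩
          rw [e1]
          conv_rhs => rw [← e2]
          exact heq
        rw [if_neg this]
    · have hr : ¬ ((decide (i.toNat ≤ t) && decide (t < i.toNat + kmer.length)
            && (kmer.getD (t - i.toNat) ' ' == el.getD (i.toNat + (t - i.toNat)) ' ')) = true) := by
        simp only [Bool.and_eq_true, decide_eq_true_eq]
        rintro ⟨⟨hc, -⟩, -⟩
        exact ha hc
      rw [if_neg hr]
      apply List.count_eq_zero_of_not_mem
      intro hmem
      rw [List.mem_filter, bPos_getD] at hmem
      have h2 := hmem.1
      simp only [List.mem_map, List.mem_filter, List.mem_range] at h2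
      obtain ⟨q, -, hq⟩ := h2
      omega
  trans ((List.range el.length).countP (fun t => decide (i.toNat ≤ t) && decide (t < i.toNat + kmer.length)
            && (kmer.getD (t - i.toNat) ' ' == el.getD (i.toNat + (t - i.toNat)) ' ')))
  · rw [← PySem.List.sum_map_ite_one_zero_nat]
    congr 1
    exact List.map_congr_left (fun t _ => hstep t)
  · rw [countP_range_shift i.toNat kmer.length el.length (by omega)
        (fun q => kmer.getD q ' ' == el.getD (i.toNat + q) ' ')]
    rfl

-- A's mismatch count of the window at i, via the match count
theorem aCount_window (kmer el : List Char) (i : Int) (h0 : 0 ≤ i)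
    (h1 : i ≤ (el.length : Int) - (kmer.length : Int)) :
    aCount kmer (PySem.List.slice el (some i) (some (i + (kmer.length : Int))))
      = (kmer.length : Int) - (matchCnt kmer el i.toNat : Int) := by
  rw [window_eq el i kmer.length h0 (by omega), aCount_eq]
  exact mism_match kmer el i h0 h1

-- the counter read back: some value ≥ need iff some alignment has ≥ need votes
theorem counter_any (hits : List Int) (need : Int) :
    ((PySem.Dict.counter hits).values.any (fun v => decide (need ≤ v)) = true)
      ↔ ∃ i ∈ hits, need ≤ (hits.count i : Int) := by
  rw [PySem.Dict.values_eq_map_keys _ (PySem.Dict.nodup_keys_counter hits) 0]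
  rw [PySem.Dict.keys_counter]
  simp only [List.any_map, List.any_eq_true, Function.comp, PySem.Dict.getD_counter]
  constructor
  · rintro ⟨i, hi, hle⟩
    exact ⟨i, (PySem.Set.mem_ofList hits i).mp hi, by simpa using hle⟩
  · rintro ⟨i, hi, hle⟩
    exact ⟨i, (PySem.Set.mem_ofList hits i).mpr hi, by simpa using hle⟩

theorem bCnt_eq_counter (hits : List Int) : bCnt hits = PySem.Dict.counter hits :=
  PySem.Dict.foldl_insert_getD_add_one_eq_counter hits

-- per-string equivalence
theorem bCheck_eq (kmer el : List Char) (b : Int) (hk : kmer ≠ []) :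
    bCheck (bPos kmer) (kmer.length : Int) ((kmer.length : Int) - b) el
      = (PySem.List.pyRange 0 ((el.length : Int) - (kmer.length : Int) + 1) 1).any
          (fun i => decide (aCount kmer (PySem.List.slice el (some i) (some (i + (kmer.length : Int)))) ≤ b)) := by
  have hk1 : 1 ≤ kmer.length := List.length_pos_iff.mpr hk
  unfold bCheck
  by_cases hnk : (el.length : Int) < (kmer.length : Int)
  · rw [if_pos hnk, PySem.List.pyRange_one_eq_nil (by omega)]
    simp
  · rw [if_neg hnk]
    have hwin : ∀ i : Int, 0 ≤ i → i ≤ (el.length : Int) - (kmer.length : Int) →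
        (aCount kmer (PySem.List.slice el (some i) (some (i + (kmer.length : Int)))) ≤ b
          ↔ (kmer.length : Int) - b ≤ (matchCnt kmer el i.toNat : Int)) := by
      intro i h0 h1
      rw [aCount_window kmer el i h0 h1]
      omega
    by_cases hneed : (kmer.length : Int) - b ≤ 0
    · rw [if_pos hneed]
      symm
      rw [List.any_eq_true]
      refine ⟨0, ?_, ?_⟩
      · rw [PySem.List.mem_pyRange_one]
        omega
      · rw [decide_eq_true_eq, window_eq el 0 kmer.length le_rfl (by omega), aCount_eq]
        have := mismN_le kmer ((el.drop (0 : Int).toNat).take kmer.length)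
        omega
    · rw [if_neg hneed, bCnt_eq_counter]
      rw [Bool.eq_iff_iff]
      rw [counter_any, List.any_eq_true]
      constructor
      · rintro ⟨i, hi, hle⟩
        obtain ⟨h0, h1⟩ := bHits_mem kmer el i hi
        rw [bHits_count kmer el i h0 h1] at hle
        refine ⟨i, ?_, ?_⟩
        · rw [PySem.List.mem_pyRange_one]
          omega
        · rw [decide_eq_true_eq, (hwin i h0 h1)]
          exact hle
      · rintro ⟨i, hi, hdec⟩
        rw [PySem.List.mem_pyRange_one] at hi
        have h0 : 0 ≤ i := hi.1
        have h1 : i ≤ (el.length : Int) - (kmer.length : Int) := by omega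
        rw [decide_eq_true_eq, hwin i h0 h1] at hdec
        have hpos : 0 < (bHits (bPos kmer) el (kmer.length : Int)).count i := by
          rw [bHits_count kmer el i h0 h1]
          omega
        refine ⟨i, List.count_pos_iff.mp hpos, ?_⟩
        rw [bHits_count kmer el i h0 h1]
        exact hdec

theorem compare_dna_spec_core (kmer : List Char) (dna : List String) (b : Int) (hk : kmer ≠ []) :
    aLoop kmer (dna.map String.toList) b
      = bLoop (bPos kmer) (kmer.length : Int) ((kmer.length : Int) - b) dna := by
  induction dna with
  | nil => simp [aLoop, bLoop]
  | cons el rest ih =>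
    simp only [List.map_cons]
    rw [aLoop, bLoop, ih]
    rw [aWhile_eq kmer el.toList b hk (el.toList.length + 1) 0 false (by omega) (by omega)]
    rw [Bool.false_or, ← bCheck_eq kmer el.toList b hk]

-- ===== VERDICT (by name: the statement is the Claim_ definition above) =====
theorem compare_dna_spec : Claim_equal_compare_dna := by
  intro def_kmer def_DNA b _ hpre
  unfold Spec_compare_dna compare_dna compare_dna_alt
  cases hpre with
  | inl hk => exact compare_dna_spec_core def_kmer.toList def_DNA b hk
  | inr hnil => subst hnil; simp [aLoop, bLoop]
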